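-- pv_equiv track=rewrite | github.com/Blake-Haydon/advent_of_code | aoc_2024/day_03/sol.py | parse_segment_2
-- ===== SOURCE A (Python) =====
-- def parse_to_ints(string):
--     assert len(string.split(",")) == 2
--     a = string.split(",")[0]
--     b = string.split(",")[1]
--
--     for c in a:
--         assert c in "1234567890"
--     for c in b:
--         assert c in "1234567890"
--
--     a, b = int(a), int(b)
--     assert a < 1000
--     assert b < 1000
--
--     return a, b
--
-- def parse_segment_2(string, do_flag):
--     total = 0
--     i = 0
--     while i < len(string):
--         if string[i:i+4] == "do()":
--             do_flag = True
--
--         if string[i:i+7] == "don't()":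
--             do_flag = False
--
--         if string[i:i+4] == "mul(":
--             j = i
--             while j < len(string) and string[j] != ")":
--                 j += 1
--
--             # try to parse
--             try:
--                 a, b = parse_to_ints(string[i+4:j])
--                 if do_flag:
--                     total += a * b
--             except:
--                 pass
--
--         i += 1
--
--     return total, do_flag
-- ===== SOURCE B (Python) =====
-- def parse_segment_2(string, do_flag):
--     # Token-consuming scan: jump past each recognised token instead of re-testing
--     # every character position, and validate mul bodies with split/isdigit instead
--     # of per-character asserts + exceptions.
--     total = 0
--     rest = string
--     while rest:
--         if rest.startswith("do()"):
--             do_flag = True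
--             rest = rest[4:]
--         elif rest.startswith("don't()"):
--             do_flag = False
--             rest = rest[7:]
--         elif rest.startswith("mul("):
--             rest = rest[4:]
--             body = rest.partition(")")[0]
--             parts = body.split(",")
--             if len(parts) == 2 and parts[0].isdigit() and parts[1].isdigit():
--                 a, b = int(parts[0]), int(parts[1])
--                 if a < 1000 and b < 1000 and do_flag:
--                     total += a * b
--         else:
--             rest = rest[1:]
--     return total, do_flag
-- ===== Notes on version B (the rewrite author's own statement) =====
-- stated objective: alternative
-- what changed: B replaces A's re-test-every-index scan (which rechecks positions inside already-recognised tokens and validates mul bodies via per-character asserts caught by try/except) with a token-consuming suffix scan that jumps past each recognised token and validates mul bodies with split/isdigit.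
import Mathlib
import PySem

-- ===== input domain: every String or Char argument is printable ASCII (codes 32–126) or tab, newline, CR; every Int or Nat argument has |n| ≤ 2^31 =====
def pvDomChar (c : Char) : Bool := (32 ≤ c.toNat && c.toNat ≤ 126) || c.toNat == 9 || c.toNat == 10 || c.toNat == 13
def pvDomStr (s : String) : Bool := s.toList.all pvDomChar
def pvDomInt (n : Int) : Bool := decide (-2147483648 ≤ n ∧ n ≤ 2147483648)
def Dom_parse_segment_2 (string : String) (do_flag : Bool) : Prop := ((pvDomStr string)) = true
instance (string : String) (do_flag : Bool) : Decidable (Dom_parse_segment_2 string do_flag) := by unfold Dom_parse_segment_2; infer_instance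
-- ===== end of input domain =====

-- B replaces A's re-test-every-index scan with a token-consuming scan (jump past each
-- recognised token) and validates mul bodies with split/isdigit instead of per-char asserts.

-- ===== PORT A =====
-- parse_to_ints: returns none exactly where the Python raises (all raises are caught by A's 'except').
-- 'c in "1234567890"' is the substring test PySem.Chars.isIn on the one-char string [c].
def pvParseToInts (cs : List Char) : Option (Int × Int) :=
  let parts := PySem.Chars.splitOn cs [',']
  if parts.length ≠ 2 then none
  else
    let a := parts.getD 0 []
    let b := parts.getD 1 []
    if ¬ (a.all (fun c => PySem.Chars.isIn [c] "1234567890".toList)) then none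
    else if ¬ (b.all (fun c => PySem.Chars.isIn [c] "1234567890".toList)) then none
    else
      match PySem.Int.ofChars? a, PySem.Int.ofChars? b with
      | some av, some bv =>
          if av < 1000 then if bv < 1000 then some (av, bv) else none else none
      | _, _ => none

-- inner 'while j < len(string) and string[j] != ")"'
def pvFindClose (l : List Char) (j : Nat) : Nat :=
  if h : j < l.length then
    if l[j] ≠ ')' then pvFindClose l (j + 1) else j
  else j
termination_by l.length - j

-- outer while loop; string[i:k] for 0 ≤ i ≤ k is (drop i).take (k-i) — exact (Python clamps, so do drop/take)
def pvLoopA (l : List Char) (i : Nat) (total : Int) (flag : Bool) : Int × Bool :=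
  if h : i < l.length then
    let flag1 := if (l.drop i).take 4 = "do()".toList then true else flag
    let flag2 := if (l.drop i).take 7 = "don't()".toList then false else flag1
    let total1 :=
      if (l.drop i).take 4 = "mul(".toList then
        let j := pvFindClose l i
        match pvParseToInts ((l.drop (i + 4)).take (j - (i + 4))) with
        | some (a, b) => if flag2 then total + a * b else total
        | none => total
      else total
    pvLoopA l (i + 1) total1 flag2
  else (total, flag)
termination_by l.length - i

def parse_segment_2 (string : String) (do_flag : Bool) : Int × Bool :=
  pvLoopA string.toList 0 0 do_flag

-- ===== PORT B =====
-- the mul( branch of Source B; int() cannot raise after isdigit, so the none branch is unreachable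
def pvMulAdd (body : List Char) (total : Int) (flag : Bool) : Int :=
  let parts := PySem.Chars.splitOn body [',']
  if parts.length = 2 && PySem.Chars.strIsdigit (parts.getD 0 [])
       && PySem.Chars.strIsdigit (parts.getD 1 []) then
    match PySem.Int.ofChars? (parts.getD 0 []), PySem.Int.ofChars? (parts.getD 1 []) with
    | some a, some b => if a < 1000 && b < 1000 && flag then total + a * b else total
    | _, _ => total
  else total

-- rest.partition(")")[0] is takeWhile (· ≠ ')'); rest[4:] on 'c :: rest' is rest.drop 3
def pvLoopB : List Char → Int → Bool → Int × Bool
  | [], total, flag => (total, flag)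
  | c :: rest, total, flag =>
    if (c :: rest).take 4 = "do()".toList then
      pvLoopB (rest.drop 3) total true
    else if (c :: rest).take 7 = "don't()".toList then
      pvLoopB (rest.drop 6) total false
    else if (c :: rest).take 4 = "mul(".toList then
      pvLoopB (rest.drop 3) (pvMulAdd ((rest.drop 3).takeWhile (· ≠ ')')) total flag) flag
    else
      pvLoopB rest total flag
termination_by l => l.length
decreasing_by all_goals (simp only [List.length_drop, List.length_cons]; omega)

def parse_segment_2_alt (string : String) (do_flag : Bool) : Int × Bool :=
  pvLoopB string.toList 0 do_flag

-- ===== PRECONDITION & SPEC =====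
def Spec_parse_segment_2 (string : String) (do_flag : Bool) (out : Int × Bool) : Prop := out = parse_segment_2_alt string do_flag
instance (string : String) (do_flag : Bool) (out : Int × Bool) : Decidable (Spec_parse_segment_2 string do_flag out) := by unfold Spec_parse_segment_2; infer_instance

-- ===== CLAIM (what is proved, stated in full; the proofs are below) =====
def Claim_equal_parse_segment_2 : Prop := ∀ (string : String) (do_flag : Bool), Dom_parse_segment_2 string do_flag → Spec_parse_segment_2 string do_flag (parse_segment_2 string do_flag)


-- ===== LEMMAS AND PROOFS =====
lemma pvCharEqOfToNat {a b : Char} (h : a.toNat = b.toNat) : a = b := by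
  apply Char.ext; unfold Char.toNat at h; exact UInt32.toNat_inj.mp h

lemma digit_char (c : Char) : PySem.Chars.isIn [c] "1234567890".toList = PySem.Chars.isdigit c := by
  have hds : "1234567890".toList = ['1','2','3','4','5','6','7','8','9','0'] := by decide
  have hmem : c ∈ "1234567890".toList ↔ (48 ≤ c.toNat ∧ c.toNat ≤ 57) := by
    rw [hds]
    constructor
    · intro hm; fin_cases hm <;> decide
    · rintro ⟨h1, h2⟩
      interval_cases h : c.toNat
      · have hc : c = '0' := pvCharEqOfToNat (h.trans (by decide : (48:Nat) = '0'.toNat))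
        simp [hc]
      · have hc : c = '1' := pvCharEqOfToNat (h.trans (by decide : (49:Nat) = '1'.toNat))
        simp [hc]
      · have hc : c = '2' := pvCharEqOfToNat (h.trans (by decide : (50:Nat) = '2'.toNat))
        simp [hc]
      · have hc : c = '3' := pvCharEqOfToNat (h.trans (by decide : (51:Nat) = '3'.toNat))
        simp [hc]
      · have hc : c = '4' := pvCharEqOfToNat (h.trans (by decide : (52:Nat) = '4'.toNat))
        simp [hc]
      · have hc : c = '5' := pvCharEqOfToNat (h.trans (by decide : (53:Nat) = '5'.toNat))
        simp [hc]
      · have hc : c = '6' := pvCharEqOfToNat (h.trans (by decide : (54:Nat) = '6'.toNat))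
        simp [hc]
      · have hc : c = '7' := pvCharEqOfToNat (h.trans (by decide : (55:Nat) = '7'.toNat))
        simp [hc]
      · have hc : c = '8' := pvCharEqOfToNat (h.trans (by decide : (56:Nat) = '8'.toNat))
        simp [hc]
      · have hc : c = '9' := pvCharEqOfToNat (h.trans (by decide : (57:Nat) = '9'.toNat))
        simp [hc]
  have hdig : PySem.Chars.isdigit c = true ↔ (48 ≤ c.toNat ∧ c.toNat ≤ 57) := by
    simp only [PySem.Chars.isdigit, Bool.and_eq_true, decide_eq_true_eq, Char.le_def,
      UInt32.le_iff_toNat_le]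
    have e0 : ('0').val.toNat = 48 := by decide
    have e9 : ('9').val.toNat = 57 := by decide
    rw [e0, e9]
    exact Iff.rfl
  cases h : PySem.Chars.isdigit c
  · rw [Bool.eq_false_iff] at h ⊢
    intro hin
    exact h (hdig.mpr (hmem.mp (((PySem.Chars.isIn_iff_infix _ _).mp hin).mem (by simp))))
  · rw [PySem.Chars.isIn_iff_infix]
    have := hmem.mpr (hdig.mp h)
    exact (List.singleton_infix_iff c _).mpr this


-- ofChars? of the empty string is a ValueError
lemma ofChars_nil : PySem.Int.ofChars? [] = none := by decide

lemma parse_eq (body : List Char) (total : Int) (flag : Bool) :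
    (match pvParseToInts body with
     | some (a, b) => if flag then total + a * b else total
     | none => total) = pvMulAdd body total flag := by
  unfold pvParseToInts pvMulAdd
  simp only [digit_char]
  by_cases h2 : (PySem.Chars.splitOn body [',']).length = 2
  · simp only [h2]
    simp only [ne_eq, not_true_eq_false, if_false, decide_true, Bool.true_and]
    generalize (PySem.Chars.splitOn body [',']).getD 0 [] = a
    generalize (PySem.Chars.splitOn body [',']).getD 1 [] = b
    by_cases hA : a.all PySem.Chars.isdigit = true
    · by_cases hB : b.all PySem.Chars.isdigit = true
      · simp only [hA, hB, not_true_eq_false, if_false]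
        unfold PySem.Chars.strIsdigit
        rcases a with _ | ⟨c, a'⟩
        · simp [ofChars_nil]
        · rcases b with _ | ⟨d, b'⟩
          · rw [ofChars_nil]
            rcases PySem.Int.ofChars? (c :: a') with _ | av <;> simp
          · simp only [List.isEmpty_cons, Bool.not_false, hA, hB, Bool.and_true, if_true]
            rcases PySem.Int.ofChars? (c :: a') with _ | av <;>
              rcases PySem.Int.ofChars? (d :: b') with _ | bv <;> simp
            by_cases q1 : av < 1000 <;> by_cases q2 : bv < 1000 <;> cases flag <;>
              simp [q1, q2]
      · simp [hA, hB, PySem.Chars.strIsdigit]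
    · simp [hA, PySem.Chars.strIsdigit]
  · rw [if_pos h2]
    rw [decide_eq_false h2]
    simp

-- characterisation of the inner ')' scan
lemma findClose_ge (l : List Char) (j : Nat) : j ≤ pvFindClose l j := by
  fun_induction pvFindClose l j <;> omega

lemma takeWhile_eq_take_findClose (l : List Char) (k : Nat) :
    (l.drop k).takeWhile (· ≠ ')') = (l.drop k).take (pvFindClose l k - k) := by
  fun_induction pvFindClose l k with
  | case1 j h hne ih =>
      have hd : l.drop j = l[j] :: l.drop (j+1) := List.drop_eq_getElem_cons h
      have hge := findClose_ge l (j+1)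
      rw [hd, List.takeWhile_cons, if_pos (by simpa using hne)]
      rw [show pvFindClose l (j+1) - j = (pvFindClose l (j+1) - (j+1)) + 1 by omega]
      rw [List.take_succ_cons]
      rw [ih]
  | case2 j h hc =>
      have hd : l.drop j = l[j] :: l.drop (j+1) := List.drop_eq_getElem_cons h
      have hcc : l[j] = ')' := by simpa using hc
      rw [Nat.sub_self, List.take_zero, hd, List.takeWhile_cons, if_neg (by simp [hcc])]
  | case3 j h =>
      have : l.drop j = [] := List.drop_eq_nil_of_le (by omega)
      simp [this]

lemma findClose_step (l : List Char) (j : Nat) (h : j < l.length) (hne : l[j] ≠ ')') :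
    pvFindClose l j = pvFindClose l (j + 1) := by
  rw [pvFindClose]; simp [h, hne]

-- a position whose character is neither 'd' nor 'm' is a no-op for A's loop
lemma head_of_take_eq {s t : List Char} {n : Nat} (hn : n ≠ 0) (h : s.take n = t) :
    s.head? = t.head? := by
  rw [← h, List.head?_take]; simp [hn]

lemma noop (l : List Char) (i : Nat) (total : Int) (flag : Bool)
    (hd : l[i]? ≠ some 'd') (hm : l[i]? ≠ some 'm') :
    pvLoopA l i total flag = pvLoopA l (i + 1) total flag := by
  rw [pvLoopA]
  by_cases h : i < l.length
  · have hh : (l.drop i).head? = l[i]? := List.head?_drop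
    have g4 : ¬ (l.drop i).take 4 = "do()".toList := by
      intro he
      apply hd
      rw [← hh, head_of_take_eq (by decide) he]; decide
    have g7 : ¬ (l.drop i).take 7 = "don't()".toList := by
      intro he
      apply hd
      rw [← hh, head_of_take_eq (by decide) he]; decide
    have gm : ¬ (l.drop i).take 4 = "mul(".toList := by
      intro he
      apply hm
      rw [← hh, head_of_take_eq (by decide) he]; decide
    rw [dif_pos h]
    simp only [if_neg g4, if_neg g7, if_neg gm]
  · rw [dif_neg h, pvLoopA, dif_neg (by omega : ¬ i + 1 < l.length)]

-- main loop correspondence: A at index i is B on the suffix from i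
lemma loop_eq (l : List Char) (i : Nat) (total : Int) (flag : Bool) :
    pvLoopA l i total flag = pvLoopB (l.drop i) total flag := by
  by_cases hlt : i < l.length
  · have hcons : l.drop i = l[i] :: l.drop (i + 1) := List.drop_eq_getElem_cons hlt
    have hget : ∀ k : Nat, (l.drop i)[k]? = l[i + k]? := fun k => List.getElem?_drop
    rw [pvLoopA, dif_pos hlt]
    by_cases c4 : (l.drop i).take 4 = "do()".toList
    · -- "do()" token
      have hshape : l.drop i = 'd' :: 'o' :: '(' :: ')' :: l.drop (i + 4) := by
        have h0 := List.take_append_drop 4 (l.drop i)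
        rw [c4, List.drop_drop, show "do()".toList = ['d','o','(',')'] from by decide] at h0
        simpa using h0.symm
      have e1 : l[i + 1]? = some 'o' := by rw [← hget 1, hshape]; rfl
      have e2 : l[i + 2]? = some '(' := by rw [← hget 2, hshape]; rfl
      have e3 : l[i + 3]? = some ')' := by rw [← hget 3, hshape]; rfl
      have c7 : ¬ (l.drop i).take 7 = "don't()".toList := by
        rw [hshape, show "don't()".toList = ['d','o','n','\'','t','(',')'] from by decide]
        simp
      have cm : ¬ (l.drop i).take 4 = "mul(".toList := by rw [c4]; decide
      simp only [if_pos c4, if_neg c7, if_neg cm]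
      rw [noop l (i + 1) total true (by rw [e1]; decide) (by rw [e1]; decide)]
      rw [show i + 1 + 1 = i + 2 by omega,
        noop l (i + 2) total true (by rw [e2]; decide) (by rw [e2]; decide),
        show i + 2 + 1 = i + 3 by omega,
        noop l (i + 3) total true (by rw [e3]; decide) (by rw [e3]; decide),
        show i + 3 + 1 = i + 4 by omega]
      rw [loop_eq l (i + 4) total true]
      conv_rhs => rw [hshape, pvLoopB]
      simp only [show "do()".toList = ['d','o','(',')'] from by decide,
        show "don't()".toList = ['d','o','n','\'','t','(',')'] from by decide,
        show "mul(".toList = ['m','u','l','('] from by decide]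
      rfl
    · by_cases c7 : (l.drop i).take 7 = "don't()".toList
      · -- "don't()" token
        have hshape : l.drop i = 'd' :: 'o' :: 'n' :: '\'' :: 't' :: '(' :: ')' :: l.drop (i + 7) := by
          have h0 := List.take_append_drop 7 (l.drop i)
          rw [c7, List.drop_drop, show "don't()".toList = ['d','o','n','\'','t','(',')'] from by decide] at h0
          simpa using h0.symm
        have e1 : l[i + 1]? = some 'o' := by rw [← hget 1, hshape]; rfl
        have e2 : l[i + 2]? = some 'n' := by rw [← hget 2, hshape]; rfl
        have e3 : l[i + 3]? = some '\'' := by rw [← hget 3, hshape]; rfl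
        have e4 : l[i + 4]? = some 't' := by rw [← hget 4, hshape]; rfl
        have e5 : l[i + 5]? = some '(' := by rw [← hget 5, hshape]; rfl
        have e6 : l[i + 6]? = some ')' := by rw [← hget 6, hshape]; rfl
        have cm : ¬ (l.drop i).take 4 = "mul(".toList := by
          rw [hshape]; simp [show "mul(".toList = ['m','u','l','('] from by decide]
        simp only [if_neg c4, if_pos c7, if_neg cm]
        rw [noop l (i + 1) total false (by rw [e1]; decide) (by rw [e1]; decide),
          show i + 1 + 1 = i + 2 by omega,
          noop l (i + 2) total false (by rw [e2]; decide) (by rw [e2]; decide),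
          show i + 2 + 1 = i + 3 by omega,
          noop l (i + 3) total false (by rw [e3]; decide) (by rw [e3]; decide),
          show i + 3 + 1 = i + 4 by omega,
          noop l (i + 4) total false (by rw [e4]; decide) (by rw [e4]; decide),
          show i + 4 + 1 = i + 5 by omega,
          noop l (i + 5) total false (by rw [e5]; decide) (by rw [e5]; decide),
          show i + 5 + 1 = i + 6 by omega,
          noop l (i + 6) total false (by rw [e6]; decide) (by rw [e6]; decide),
          show i + 6 + 1 = i + 7 by omega]
        rw [loop_eq l (i + 7) total false]
        conv_rhs => rw [hshape, pvLoopB]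
        simp only [show "do()".toList = ['d','o','(',')'] from by decide,
          show "don't()".toList = ['d','o','n','\'','t','(',')'] from by decide,
          show "mul(".toList = ['m','u','l','('] from by decide]
        rfl
      · by_cases cm : (l.drop i).take 4 = "mul(".toList
        · -- "mul(" token
          have hshape : l.drop i = 'm' :: 'u' :: 'l' :: '(' :: l.drop (i + 4) := by
            have h0 := List.take_append_drop 4 (l.drop i)
            rw [cm, List.drop_drop, show "mul(".toList = ['m','u','l','('] from by decide] at h0
            simpa using h0.symm
          have e0 : l[i]? = some 'm' := by
            have := hget 0; rw [hshape] at this; simpa using this.symm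
          have e1 : l[i + 1]? = some 'u' := by rw [← hget 1, hshape]; rfl
          have e2 : l[i + 2]? = some 'l' := by rw [← hget 2, hshape]; rfl
          have e3 : l[i + 3]? = some '(' := by rw [← hget 3, hshape]; rfl
          simp only [if_neg c4, if_neg c7, if_pos cm]
          -- the ')' scan starting at i equals the scan starting at i+4
          have hfc : pvFindClose l i = pvFindClose l (i + 4) := by
            have g0 : l[i] = 'm' := by
              have := List.getElem?_eq_getElem hlt; rw [e0] at this; exact (Option.some_inj.mp this).symm
            have l1 : i + 1 < l.length := by
              rcases List.getElem?_eq_some_iff.mp e1 with ⟨hw, _⟩; exact hw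
            have l2 : i + 2 < l.length := by
              rcases List.getElem?_eq_some_iff.mp e2 with ⟨hw, _⟩; exact hw
            have l3 : i + 3 < l.length := by
              rcases List.getElem?_eq_some_iff.mp e3 with ⟨hw, _⟩; exact hw
            have g1 : l[i + 1] = 'u' := by
              have := List.getElem?_eq_getElem l1; rw [e1] at this; exact (Option.some_inj.mp this).symm
            have g2 : l[i + 2] = 'l' := by
              have := List.getElem?_eq_getElem l2; rw [e2] at this; exact (Option.some_inj.mp this).symm
            have g3 : l[i + 3] = '(' := by
              have := List.getElem?_eq_getElem l3; rw [e3] at this; exact (Option.some_inj.mp this).symm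
            rw [findClose_step l i hlt (by rw [g0]; decide),
              show i + 1 + 1 = i + 2 by omega] at *
            rw [findClose_step l (i + 1) l1 (by rw [g1]; decide),
              show i + 1 + 1 = i + 2 by omega,
              findClose_step l (i + 2) l2 (by rw [g2]; decide),
              show i + 2 + 1 = i + 3 by omega,
              findClose_step l (i + 3) l3 (by rw [g3]; decide),
              show i + 3 + 1 = i + 4 by omega]
          rw [hfc]
          have hbody : (l.drop (i + 4)).take (pvFindClose l (i + 4) - (i + 4)) =
              (l.drop (i + 4)).takeWhile (· ≠ ')') := (takeWhile_eq_take_findClose l (i + 4)).symm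
          rw [hbody, parse_eq]
          rw [noop l (i + 1) _ flag (by rw [e1]; decide) (by rw [e1]; decide),
            show i + 1 + 1 = i + 2 by omega,
            noop l (i + 2) _ flag (by rw [e2]; decide) (by rw [e2]; decide),
            show i + 2 + 1 = i + 3 by omega,
            noop l (i + 3) _ flag (by rw [e3]; decide) (by rw [e3]; decide),
            show i + 3 + 1 = i + 4 by omega]
          rw [loop_eq l (i + 4) _ flag]
          conv_rhs => rw [hshape, pvLoopB]
          simp only [show "do()".toList = ['d','o','(',')'] from by decide,
            show "don't()".toList = ['d','o','n','\'','t','(',')'] from by decide,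
            show "mul(".toList = ['m','u','l','('] from by decide]
          rfl
        · -- no token here: single step
          simp only [if_neg c4, if_neg c7, if_neg cm]
          rw [loop_eq l (i + 1) total flag]
          conv_rhs => rw [hcons, pvLoopB]
          rw [← hcons]
          simp only [if_neg c4, if_neg c7, if_neg cm]
  · rw [pvLoopA, dif_neg hlt, List.drop_eq_nil_of_le (by omega), pvLoopB]
termination_by l.length - i
decreasing_by all_goals omega

-- ===== VERDICT (by name: the statement is the Claim_ definition above) =====
theorem parse_segment_2_spec : Claim_equal_parse_segment_2 := by
  intro s f _
  unfold Spec_parse_segment_2 parse_segment_2 parse_segment_2_alt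
  simpa using loop_eq s.toList 0 0 f
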